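-- pv_equiv track=rewrite | github.com/MrBrantCode/unitest_baseline | mut_generate/mist_train_cf/cf_96989/solution.py | find_word_occurrences
-- ===== SOURCE A (Python) =====
-- def find_word_occurrences(s, words):
--     occurrences = {}
--     words_in_string = s.split()
--
--     for word in words:
--         count = 0
--         for string_word in words_in_string:
--             if string_word == word:
--                 count += 1
--         occurrences[word] = count
--
--     return occurrences
-- ===== SOURCE B (Python) =====
-- def find_word_occurrences(s, words):
--     counts = {}
--     for token in s.split():
--         counts[token] = counts.get(token, 0) + 1
--     return {word: counts.get(word, 0) for word in words}
-- ===== Notes on version B (the rewrite author's own statement) =====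
-- stated objective: alternative
-- what changed: B builds a frequency dictionary of the tokens in one pass and answers each query by a lookup, instead of rescanning all tokens for every query word.
import Mathlib
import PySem

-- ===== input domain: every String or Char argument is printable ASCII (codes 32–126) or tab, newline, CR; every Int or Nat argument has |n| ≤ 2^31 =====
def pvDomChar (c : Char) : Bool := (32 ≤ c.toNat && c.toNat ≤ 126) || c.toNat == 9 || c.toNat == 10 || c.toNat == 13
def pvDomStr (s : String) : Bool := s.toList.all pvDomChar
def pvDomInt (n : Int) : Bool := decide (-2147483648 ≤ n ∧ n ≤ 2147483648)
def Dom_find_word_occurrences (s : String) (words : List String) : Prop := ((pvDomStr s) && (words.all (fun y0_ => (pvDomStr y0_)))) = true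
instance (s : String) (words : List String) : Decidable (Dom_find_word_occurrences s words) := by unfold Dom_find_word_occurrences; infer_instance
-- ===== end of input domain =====

-- ===== PORT A =====
-- A: for each query word, rescan all tokens of s counting matches; result dict in query order.
def find_word_occurrences (s : String) (words : List String) : List (String × Int) :=
  let words_in_string := PySem.Str.split₀ s
  (words.foldl (fun occurrences word =>
      occurrences.insert word
        (words_in_string.foldl (fun count string_word =>
            if string_word == word then count + 1 else count) (0 : Int)))
    PySem.Dict.empty).items

-- ===== PORT B =====
-- B: one pass builds a token-frequency dict, then each query word is a lookup.
def find_word_occurrences_alt (s : String) (words : List String) : List (String × Int) :=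
  let counts := (PySem.Str.split₀ s).foldl
      (fun d token => d.insert token (d.getD token 0 + 1)) PySem.Dict.empty
  (words.foldl (fun d word => d.insert word (counts.getD word 0)) PySem.Dict.empty).items

-- ===== PRECONDITION & SPEC =====
def Spec_find_word_occurrences (s : String) (words : List String) (out : List (String × Int)) : Prop := out = find_word_occurrences_alt s words
instance (s : String) (words : List String) (out : List (String × Int)) : Decidable (Spec_find_word_occurrences s words out) := by unfold Spec_find_word_occurrences; infer_instance

-- ===== CLAIM (what is proved, stated in full; the proofs are below) =====
def Claim_equal_find_word_occurrences : Prop := ∀ (s : String) (words : List String), Dom_find_word_occurrences s words → Spec_find_word_occurrences s words (find_word_occurrences s words)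

-- ===== LEMMAS AND PROOFS =====
-- Both folds over the query words insert the same value for every word:
-- A's rescan count equals B's counter lookup.
theorem fwo_foldl_eq (toks ws : List String) (d : PySem.Dict String Int) :
    ws.foldl (fun occurrences word =>
        occurrences.insert word
          (toks.foldl (fun count string_word =>
              if string_word == word then count + 1 else count) (0 : Int))) d
    = ws.foldl (fun d' word => d'.insert word ((PySem.Dict.counter toks).getD word 0)) d := by
  induction ws generalizing d with
  | nil => rfl
  | cons w rest ih =>
    simp only [List.foldl_cons]
    rw [PySem.List.foldl_count_if, PySem.Dict.getD_counter]
    simp only [List.count, zero_add]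
    exact ih _

-- ===== VERDICT (by name: the statement is the Claim_ definition above) =====
theorem find_word_occurrences_spec : Claim_equal_find_word_occurrences := by
  intro s words _
  unfold Spec_find_word_occurrences find_word_occurrences find_word_occurrences_alt
  dsimp only
  rw [PySem.Dict.foldl_insert_getD_add_one_eq_counter, fwo_foldl_eq]
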